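-- pv_equiv track=rewrite | github.com/alexrudnick/chipa | src/learn.py | target_words_for_each_source_word
-- ===== SOURCE A (Python) =====
-- from operator import itemgetter
--
-- def target_words_for_each_source_word(ss, ts, alignment):
--     """Given a list of tokens in source language, a list of tokens in target
--     language, and a list of Berkeley-style alignments of the form target-source,
--     for each source word, return the list of corresponding target words."""
--     alignment = [tuple(map(int, pair.split('-'))) for pair in alignment]
--     out = [list() for i in range(len(ss))]
--     indices = [list() for i in range(len(ss))]
--     alignment.sort(key=itemgetter(0))
--     for (ti,si) in alignment:
--         ## make sure we're grabbing contiguous phrases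
--         if (not indices[si]) or (ti == indices[si][-1] + 1):
--             indices[si].append(ti)
--             targetword = ts[ti]
--             out[si].append(targetword)
--     return [" ".join(targetwords) for targetwords in out]
-- ===== SOURCE B (Python) =====
-- def target_words_for_each_source_word(ss, ts, alignment):
--     """No sorting at all: collect each source word's target indices into a set,
--     then extend upward from the minimum by set membership to get the
--     contiguous run of target words."""
--     have = [set() for _ in ss]
--     for pair in alignment:
--         ti, si = map(int, pair.split('-'))
--         have[si].add(ti)
--     result = []
--     for group in have:
--         words = []
--         if group:
--             t = min(group)
--             while t in group:
--                 words.append(ts[t])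
--                 t += 1
--         result.append(" ".join(words))
--     return result
-- ===== Notes on version B (the rewrite author's own statement) =====
-- stated objective: alternative
-- what changed: Eliminates sorting entirely: instead of A's global stable sort of the alignment pairs followed by an interleaved stateful contiguity scan, B collects each source word's target indices into a set and walks upward from the set's minimum by membership to produce the contiguous run.
import Mathlib
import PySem

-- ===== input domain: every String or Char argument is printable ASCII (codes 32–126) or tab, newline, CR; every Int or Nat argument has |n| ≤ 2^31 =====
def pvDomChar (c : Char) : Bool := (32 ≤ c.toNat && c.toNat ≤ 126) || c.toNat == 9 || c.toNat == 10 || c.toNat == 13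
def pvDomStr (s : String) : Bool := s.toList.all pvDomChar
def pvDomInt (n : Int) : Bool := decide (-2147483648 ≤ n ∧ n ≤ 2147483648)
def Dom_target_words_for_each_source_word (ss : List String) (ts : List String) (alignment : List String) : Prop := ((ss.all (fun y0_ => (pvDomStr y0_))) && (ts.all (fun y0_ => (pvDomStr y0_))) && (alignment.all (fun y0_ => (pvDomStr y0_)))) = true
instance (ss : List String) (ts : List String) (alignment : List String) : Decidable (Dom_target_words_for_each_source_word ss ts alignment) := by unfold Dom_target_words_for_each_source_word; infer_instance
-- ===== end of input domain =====

-- ===== PORT A =====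
-- B removes the sort entirely: it collects each source word's target indices into a set and
-- walks upward from the set's minimum by membership (objective: alternative, not claimed faster).
-- shared parse helper: tuple(map(int, pair.split('-'))) unpacked as (ti, si) — identical line in both Pythons
def pvParsePair (pair : String) : Int × Int :=
  let parts := ((PySem.Str.split? pair "-").getD []).map (fun x => (PySem.Int.ofStr? x).getD 0)
  (PySem.List.pyGetD parts 0 0, PySem.List.pyGetD parts 1 0)

def target_words_for_each_source_word (ss : List String) (ts : List String) (alignment : List String) : List String :=
  let algn := alignment.map pvParsePair
  let out0 : List (List String) := List.replicate ss.length []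
  let idx0 : List (List Int) := List.replicate ss.length []
  let srt := PySem.List.sorted algn (fun p => p.1)
  let st := srt.foldl (fun (st : List (List Int) × List (List String)) p =>
      let idx := PySem.List.pyGetD st.1 p.2 []
      if idx = [] ∨ p.1 = PySem.List.pyGetD idx (-1) 0 + 1 then
        (PySem.List.pySetD st.1 p.2 (idx ++ [p.1]),
         PySem.List.pySetD st.2 p.2 (PySem.List.pyGetD st.2 p.2 [] ++ [PySem.List.pyGetD ts p.1 ""]))
      else st) (idx0, out0)
  st.2.map (fun ws => PySem.Str.join " " ws)

-- ===== PORT B =====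
-- fuel-bounded transcription of B's 'while t in group' loop; fuel = the set's size bounds the
-- walk exactly (each successful step consumes a distinct member of the set), so it is exact
def pvWalk (ts : List String) (g : PySem.Set Int) : Nat → Int → List String
  | 0, _ => []
  | n+1, t => if PySem.Set.contains g t then PySem.List.pyGetD ts t "" :: pvWalk ts g n (t+1) else []

def target_words_for_each_source_word_alt (ss : List String) (ts : List String) (alignment : List String) : List String :=
  let haveSets := alignment.foldl (fun (h : List (PySem.Set Int)) pair =>
      let p := pvParsePair pair
      PySem.List.pySetD h p.2 (PySem.Set.add (PySem.List.pyGetD h p.2 PySem.Set.empty) p.1))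
    (List.replicate ss.length PySem.Set.empty)
  haveSets.map (fun g =>
    PySem.Str.join " " (match PySem.List.min? g (fun t => t) with
      | none => []
      | some m => pvWalk ts g g.length m))

-- ===== PRECONDITION & SPEC =====
-- the target indices of the alignment pairs whose source index is si (used only by Pre_)
def pvGroupTis (alignment : List String) (si : Int) : List Int :=
  (alignment.map pvParsePair).filterMap (fun p => if p.2 = si then some p.1 else none)

-- Pre_ admits exactly the inputs on which Python A returns: every alignment entry splits into two
-- int-parsable parts (else ValueError), its source index is a valid index into ss (else IndexError),
-- and whenever its target index ti is gap-free from its group's minimum (i.e. ti survives the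
-- contiguity test, so ts[ti] is actually read) ti is a valid index into ts (else IndexError).
def Pre_target_words_for_each_source_word (ss : List String) (ts : List String) (alignment : List String) : Prop :=
  ∀ pair ∈ alignment,
    ((PySem.Str.split? pair "-").getD []).length = 2 ∧
    (∀ part ∈ (PySem.Str.split? pair "-").getD [], (PySem.Int.ofStr? part).isSome = true) ∧
    0 ≤ (pvParsePair pair).2 ∧ (pvParsePair pair).2 < (ss.length : Int) ∧
    ((∀ j ∈ PySem.List.pyRange 0 (pvParsePair pair).1 1,
        (∃ t' ∈ pvGroupTis alignment (pvParsePair pair).2, t' ≤ j) →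
          j ∈ pvGroupTis alignment (pvParsePair pair).2) →
      0 ≤ (pvParsePair pair).1 ∧ (pvParsePair pair).1 < (ts.length : Int))

instance (ss : List String) (ts : List String) (alignment : List String) : Decidable (Pre_target_words_for_each_source_word ss ts alignment) := by unfold Pre_target_words_for_each_source_word; infer_instance

def pvWitness_target_words_for_each_source_word : List String × List String × List String :=
  (["a", "b"], ["x", "y"], ["0-0", "1-0"])

def Spec_target_words_for_each_source_word (ss : List String) (ts : List String) (alignment : List String) (out : List String) : Prop := out = target_words_for_each_source_word_alt ss ts alignment
instance (ss : List String) (ts : List String) (alignment : List String) (out : List String) : Decidable (Spec_target_words_for_each_source_word ss ts alignment out) := by unfold Spec_target_words_for_each_source_word; infer_instance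

-- ===== CLAIM (what is proved, stated in full; the proofs are below) =====
def Claim_equal_target_words_for_each_source_word : Prop := ∀ (ss : List String) (ts : List String) (alignment : List String), Dom_target_words_for_each_source_word ss ts alignment → Pre_target_words_for_each_source_word ss ts alignment → Spec_target_words_for_each_source_word ss ts alignment (target_words_for_each_source_word ss ts alignment)

-- ===== LEMMAS AND PROOFS =====

-- normalized (non-negative) form of a valid Python index
def pvNorm (n : Nat) (i : Int) : Nat := if 0 ≤ i then i.toNat else n - (-i).toNat

-- the target indices of the pairs belonging to source cell k
def pvTisk (n : Nat) (L : List (Int × Int)) (k : Nat) : List Int :=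
  (L.filter (fun p => pvNorm n p.2 == k)).map (fun p => p.1)

def pvLook (ts : List String) (t : Int) : String := PySem.List.pyGetD ts t ""

-- A's per-cell update on the (indices, out) pair of one source cell
def pvCellStep (ts : List String) (c : List Int × List String) (t : Int) : List Int × List String :=
  if c.1 = [] ∨ t = PySem.List.pyGetD c.1 (-1) 0 + 1 then (c.1 ++ [t], c.2 ++ [pvLook ts t]) else c

-- the scan A performs on one cell's target-index list
def pvScanStep (kept : List Int) (t : Int) : List Int :=
  if kept = [] ∨ t = PySem.List.pyGetD kept (-1) 0 + 1 then kept ++ [t] else kept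

-- A's loop body / B's grouping loop body, named for the lemmas
def pvStepA (ts : List String) (st : List (List Int) × List (List String)) (p : Int × Int) : List (List Int) × List (List String) :=
  if PySem.List.pyGetD st.1 p.2 [] = [] ∨ p.1 = PySem.List.pyGetD (PySem.List.pyGetD st.1 p.2 []) (-1) 0 + 1 then
    (PySem.List.pySetD st.1 p.2 (PySem.List.pyGetD st.1 p.2 [] ++ [p.1]),
     PySem.List.pySetD st.2 p.2 (PySem.List.pyGetD st.2 p.2 [] ++ [PySem.List.pyGetD ts p.1 ""]))
  else st

def pvStepS (h : List (PySem.Set Int)) (p : Int × Int) : List (PySem.Set Int) :=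
  PySem.List.pySetD h p.2 (PySem.Set.add (PySem.List.pyGetD h p.2 PySem.Set.empty) p.1)

theorem pvIdx?_eq (n : Nat) (i : Int) (h1 : -(n : Int) ≤ i) (h2 : i < n) :
    PySem.List.pyIdx? n i = some (pvNorm n i) := by
  simp only [PySem.List.pyIdx?, pvNorm]
  split_ifs <;> simp_all

theorem pvNorm_lt (n : Nat) (i : Int) (h1 : -(n : Int) ≤ i) (h2 : i < n) : pvNorm n i < n := by
  unfold pvNorm; split_ifs <;> omega

theorem pvGetD_norm {α : Type} (xs : List α) (i : Int) (d : α)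
    (h1 : -(xs.length : Int) ≤ i) (h2 : i < xs.length) :
    PySem.List.pyGetD xs i d = xs.getD (pvNorm xs.length i) d := by
  simp [PySem.List.pyGetD, PySem.List.pyGet?, pvIdx?_eq _ _ h1 h2, List.getD]

theorem pvSetD_norm {α : Type} (xs : List α) (i : Int) (v : α)
    (h1 : -(xs.length : Int) ≤ i) (h2 : i < xs.length) :
    PySem.List.pySetD xs i v = xs.set (pvNorm xs.length i) v := by
  simp [PySem.List.pySetD, PySem.List.pySet?, pvIdx?_eq _ _ h1 h2]

theorem pvGetD_set {α : Type} (xs : List α) (j k : Nat) (v d : α) (hj : j < xs.length) :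
    (xs.set j v).getD k d = if j = k then v else xs.getD k d := by
  rcases eq_or_ne j k with h | h
  · subst h; simp [List.getD, hj]
  · simp [List.getD, h]

theorem pvStepA_len_one (ts : List String) (st : List (List Int) × List (List String)) (p : Int × Int) :
    (pvStepA ts st p).1.length = st.1.length ∧ (pvStepA ts st p).2.length = st.2.length := by
  simp only [pvStepA]; split <;> simp [PySem.List.length_pySetD]

theorem pvStepA_len (ts : List String) (L : List (Int × Int)) (st : List (List Int) × List (List String)) :
    (L.foldl (pvStepA ts) st).1.length = st.1.length ∧ (L.foldl (pvStepA ts) st).2.length = st.2.length := by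
  induction L generalizing st with
  | nil => exact ⟨rfl, rfl⟩
  | cons p L ih =>
    simp only [List.foldl_cons]
    obtain ⟨a, b⟩ := ih (pvStepA ts st p)
    obtain ⟨c, d⟩ := pvStepA_len_one ts st p
    exact ⟨a.trans c, b.trans d⟩

theorem pvStepS_len (L : List (Int × Int)) (g : List (PySem.Set Int)) :
    (L.foldl pvStepS g).length = g.length := by
  induction L generalizing g with
  | nil => rfl
  | cons p L ih =>
    simp only [List.foldl_cons]
    rw [ih]
    unfold pvStepS; simp [PySem.List.length_pySetD]

theorem pvStepA_cell (ts : List String) (n : Nat) (st : List (List Int) × List (List String))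
    (p : Int × Int) (h1 : st.1.length = n) (h2 : st.2.length = n)
    (hp1 : -(n : Int) ≤ p.2) (hp2 : p.2 < n) (k : Nat) :
    ((pvStepA ts st p).1.getD k [], (pvStepA ts st p).2.getD k []) =
      if pvNorm n p.2 = k then pvCellStep ts (st.1.getD k [], st.2.getD k []) p.1
      else (st.1.getD k [], st.2.getD k []) := by
  subst h1
  have e2 : st.2.length = st.1.length := h2
  have hj : pvNorm st.1.length p.2 < st.1.length := pvNorm_lt st.1.length p.2 hp1 hp2
  have hj2 : pvNorm st.1.length p.2 < st.2.length := by rw [e2]; exact hj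
  have ej : pvNorm st.2.length p.2 = pvNorm st.1.length p.2 := by rw [e2]
  simp only [pvStepA, pvCellStep]
  rw [pvGetD_norm st.1 p.2 [] hp1 hp2,
      pvSetD_norm st.1 p.2 _ hp1 hp2,
      pvSetD_norm st.2 p.2 _ (by rw [e2]; exact hp1) (by rw [e2]; exact hp2),
      pvGetD_norm st.2 p.2 [] (by rw [e2]; exact hp1) (by rw [e2]; exact hp2), ej]
  rcases eq_or_ne (pvNorm st.1.length p.2) k with h | h
  · subst h
    split <;> simp [hj, hj2, pvLook]
  · split <;> simp [h]

theorem pvCellA (ts : List String) (n : Nat) (L : List (Int × Int))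
    (st : List (List Int) × List (List String)) (h1 : st.1.length = n) (h2 : st.2.length = n)
    (hL : ∀ p ∈ L, -(n : Int) ≤ p.2 ∧ p.2 < n) (k : Nat) :
    ((L.foldl (pvStepA ts) st).1.getD k [], (L.foldl (pvStepA ts) st).2.getD k []) =
      (pvTisk n L k).foldl (pvCellStep ts) (st.1.getD k [], st.2.getD k []) := by
  induction L generalizing st with
  | nil => simp [pvTisk]
  | cons p L ih =>
    obtain ⟨hp1, hp2⟩ := hL p (List.mem_cons_self ..)
    obtain ⟨l1, l2⟩ := pvStepA_len_one ts st p
    have ihx := ih (pvStepA ts st p) (l1.trans h1) (l2.trans h2)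
      (fun q hq => hL q (List.mem_cons_of_mem _ hq))
    simp only [List.foldl_cons]
    rw [ihx, pvStepA_cell ts n st p h1 h2 hp1 hp2 k]
    simp only [pvTisk, List.filter_cons]
    rcases eq_or_ne (pvNorm n p.2) k with h | h
    · simp [h]
    · simp [h]

theorem pvStepS_cell (n : Nat) (g : List (PySem.Set Int)) (p : Int × Int) (hG : g.length = n)
    (hp1 : -(n : Int) ≤ p.2) (hp2 : p.2 < n) (k : Nat) :
    (pvStepS g p).getD k [] =
      if pvNorm n p.2 = k then PySem.Set.add (g.getD k []) p.1 else g.getD k [] := by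
  subst hG
  have hj := pvNorm_lt g.length p.2 hp1 hp2
  unfold pvStepS
  rw [pvSetD_norm g p.2 _ hp1 hp2, pvGetD_norm g p.2 _ hp1 hp2,
      pvGetD_set _ _ _ _ _ hj]
  rcases eq_or_ne (pvNorm g.length p.2) k with h | h
  · subst h; simp [PySem.Set.empty]
  · simp [h]

theorem pvCellS (n : Nat) (L : List (Int × Int)) (g : List (PySem.Set Int)) (hG : g.length = n)
    (hL : ∀ p ∈ L, -(n : Int) ≤ p.2 ∧ p.2 < n) (k : Nat) :
    (L.foldl pvStepS g).getD k [] = (pvTisk n L k).foldl PySem.Set.add (g.getD k []) := by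
  induction L generalizing g with
  | nil => simp [pvTisk]
  | cons p L ih =>
    obtain ⟨hp1, hp2⟩ := hL p (List.mem_cons_self ..)
    have hG' : (pvStepS g p).length = n := by
      rw [← hG]; unfold pvStepS; simp [PySem.List.length_pySetD]
    have ihx := ih (pvStepS g p) hG' (fun q hq => hL q (List.mem_cons_of_mem _ hq))
    simp only [List.foldl_cons]
    rw [ihx, pvStepS_cell n g p hG hp1 hp2 k]
    simp only [pvTisk, List.filter_cons]
    rcases eq_or_ne (pvNorm n p.2) k with h | h
    · simp [h]
    · simp [h]

theorem pvCellPair (ts : List String) (l : List Int) (kept : List Int) :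
    l.foldl (pvCellStep ts) (kept, kept.map (pvLook ts)) =
      (l.foldl pvScanStep kept, (l.foldl pvScanStep kept).map (pvLook ts)) := by
  induction l generalizing kept with
  | nil => rfl
  | cons t l ih =>
    simp only [List.foldl_cons]
    by_cases hc : kept = [] ∨ t = PySem.List.pyGetD kept (-1) 0 + 1
    · have ha : pvCellStep ts (kept, kept.map (pvLook ts)) t = (kept ++ [t], (kept ++ [t]).map (pvLook ts)) := by
        simp only [pvCellStep]; rw [if_pos hc]; simp
      have hb : pvScanStep kept t = kept ++ [t] := by
        simp only [pvScanStep]; rw [if_pos hc]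
      rw [ha, hb]; exact ih (kept ++ [t])
    · have ha : pvCellStep ts (kept, kept.map (pvLook ts)) t = (kept, kept.map (pvLook ts)) := by
        simp only [pvCellStep]; rw [if_neg hc]
      have hb : pvScanStep kept t = kept := by
        simp only [pvScanStep]; rw [if_neg hc]
      rw [ha, hb]; exact ih kept

theorem pvTisk_sorted (n : Nat) (L : List (Int × Int)) (k : Nat) :
    pvTisk n (PySem.List.sorted L (fun p => p.1)) k = PySem.List.sorted (pvTisk n L k) (fun t => t) := by
  refine (PySem.List.sorted_id_eq_of_perm_of_pairwise (pvTisk n L k)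
    (pvTisk n (PySem.List.sorted L (fun p => p.1)) k) ?_ ?_).symm
  · simp only [pvTisk]
    exact ((PySem.List.sorted_perm L (fun p => p.1) false).filter _).map _
  · have hpw := PySem.List.sorted_pairwise L (fun p => p.1)
    simp only [pvTisk]
    exact List.pairwise_map.mpr (hpw.filter _)

theorem pvRepGetD {α : Type} (n k : Nat) : (List.replicate n ([] : List α)).getD k [] = [] := by
  rcases lt_or_ge k n with h | h <;> simp [List.getD, h]

theorem pv_parse_bounds (ss ts : List String) (alignment : List String)
    (hPre : Pre_target_words_for_each_source_word ss ts alignment) :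
    ∀ p ∈ alignment.map pvParsePair, -(ss.length : Int) ≤ p.2 ∧ p.2 < ss.length := by
  intro p hp
  obtain ⟨pair, hpair, rfl⟩ := List.mem_map.mp hp
  obtain ⟨-, -, h0, h1, -⟩ := hPre pair hpair
  exact ⟨by omega, h1⟩

-- the membership run walked by B: ∃ d ≤ fuel with the walk being the first d lookups
theorem pvWalkSpec (ts : List String) (S : List Int) :
    ∀ (fuel : Nat) (t : Int), ∃ d : Nat, d ≤ fuel ∧
      pvWalk ts S fuel t = (List.range d).map (fun (j : Nat) => pvLook ts (t + (j : Int))) ∧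
      (∀ j : Nat, j < d → t + (j : Int) ∈ S) ∧
      (d = fuel ∨ t + (d : Int) ∉ S) := by
  intro fuel
  induction fuel with
  | zero => intro t; exact ⟨0, le_refl _, rfl, by omega, Or.inl rfl⟩
  | succ n ih =>
    intro t
    cases hc : PySem.Set.contains S t with
    | false =>
      have hnotmem : t ∉ S := by
        intro hmem
        have hct := (PySem.Set.contains_iff S t).mpr hmem
        rw [hc] at hct
        exact Bool.false_ne_true hct
      refine ⟨0, Nat.zero_le _, ?_, fun j hj => absurd hj (by omega), Or.inr (by simpa using hnotmem)⟩
      show (if PySem.Set.contains S t = true then PySem.List.pyGetD ts t "" :: pvWalk ts S n (t + 1) else []) = _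
      rw [hc]
      simp
    | true =>
      obtain ⟨d, hdle, heq, hmem, hlast⟩ := ih (t + 1)
      have htS : t ∈ S := by
        have := (PySem.Set.contains_iff (s := S) (x := t)).mp hc
        simpa using this
      refine ⟨d + 1, by omega, ?_, ?_, ?_⟩
      · simp only [pvWalk, hc, if_pos]
        rw [heq, List.range_succ_eq_map, List.map_cons, List.map_map]
        refine congrArg₂ _ (by simp [pvLook]) (List.map_congr_left ?_)
        intro j _; simp only [Function.comp_apply, pvLook]
        congr 1; push_cast; ring
      · intro j hj
        cases j with
        | zero => simpa using htS
        | succ j' =>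
          have h2 := hmem j' (by omega)
          have e : t + ((j' + 1 : Nat) : Int) = t + 1 + (j' : Int) := by push_cast; ring
          rw [e]; exact h2
      · rcases hlast with h | h
        · exact Or.inl (by omega)
        · refine Or.inr ?_
          have e : t + ((d + 1 : Nat) : Int) = t + 1 + (d : Int) := by push_cast; ring
          rw [e]; exact h

-- pigeonhole: a Nodup list cannot contain length+1 consecutive values starting at t
theorem pvPigeon (S : List Int) (t : Int)
    (h : ∀ j : Nat, j < S.length → t + (j : Int) ∈ S) : t + (S.length : Int) ∉ S := by
  intro hmem
  have hall : ∀ j : Nat, j < S.length + 1 → t + (j : Int) ∈ S := by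
    intro j hj
    rcases Nat.lt_or_ge j S.length with h' | h'
    · exact h j h'
    · have : j = S.length := by omega
      rw [this]; exact hmem
  set vals : List Int := (List.range (S.length + 1)).map (fun (j : Nat) => t + (j : Int)) with hv
  have hnd : vals.Nodup := by
    refine List.Nodup.map ?_ (List.nodup_range)
    intro a b hab
    simp only at hab
    exact_mod_cast add_left_cancel hab
  have hsub : vals ⊆ S := by
    intro x hx
    obtain ⟨j, hj, rfl⟩ := List.mem_map.mp hx
    exact hall j (List.mem_range.mp hj)
  have := (List.subperm_of_subset hnd hsub).length_le
  simp [hv] at this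

-- two maximal membership runs from the same start have the same length
theorem pvRunUniq (P : Int → Prop) (t : Int) (d1 d2 : Nat)
    (h1 : ∀ j : Nat, j < d1 → P (t + (j : Int))) (n1 : ¬ P (t + (d1 : Int)))
    (h2 : ∀ j : Nat, j < d2 → P (t + (j : Int))) (n2 : ¬ P (t + (d2 : Int))) : d1 = d2 := by
  rcases Nat.lt_trichotomy d1 d2 with h | h | h
  · exact absurd (h2 d1 h) n1
  · exact h
  · exact absurd (h1 d2 h) n2

-- A's contiguity scan over a sorted nonempty remainder appends exactly the membership run after the last kept index
theorem pvScanExt (l : List Int) (hpw : l.Pairwise (· ≤ ·)) :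
    ∀ (K : List Int), K ≠ [] →
    ∃ d : Nat,
      l.foldl pvScanStep K = K ++ (List.range d).map (fun (j : Nat) => PySem.List.pyGetD K (-1) 0 + 1 + (j : Int)) ∧
      (∀ j : Nat, j < d → PySem.List.pyGetD K (-1) 0 + 1 + (j : Int) ∈ l) ∧
      PySem.List.pyGetD K (-1) 0 + 1 + (d : Nat) ∉ l := by
  induction l with
  | nil => intro K hK; exact ⟨0, by simp, by omega, by simp⟩
  | cons t l ih =>
    intro K hK
    obtain ⟨hhead, hpw'⟩ := List.pairwise_cons.mp hpw
    by_cases hc : t = PySem.List.pyGetD K (-1) 0 + 1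
    · -- appended
      have hstep : pvScanStep K t = K ++ [t] := by
        simp only [pvScanStep]; rw [if_pos (Or.inr hc)]
      have hlast : PySem.List.pyGetD (K ++ [t]) (-1) 0 = t :=
        PySem.List.pyGetD_neg_one_append_singleton K t 0
      obtain ⟨d, heq, hmem, hnot⟩ := ih hpw' (K ++ [t]) (by simp)
      rw [hlast] at heq hmem hnot
      refine ⟨d + 1, ?_, ?_, ?_⟩
      · simp only [List.foldl_cons, hstep, heq]
        rw [List.append_assoc]
        congr 1
        rw [List.range_succ_eq_map, List.map_cons, List.map_map]
        simp only [List.singleton_append]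
        congr 1
        · push_cast; omega
        · refine List.map_congr_left ?_
          intro j _
          simp only [Function.comp_apply]
          push_cast; omega
      · intro j hj
        cases j with
        | zero => simp [hc]
        | succ j' =>
          have := hmem j' (by omega)
          refine List.mem_cons_of_mem _ ?_
          convert this using 1
          push_cast; omega
      · intro hmem'
        rcases List.mem_cons.mp hmem' with h | h
        · omega
        · refine hnot ?_
          convert h using 1
          push_cast; omega
    · -- skipped: t ≠ u + 1
      have hstep : pvScanStep K t = K := by
        simp only [pvScanStep]; rw [if_neg (fun hor => hor.elim hK hc)]
      obtain ⟨d, heq, hmem, hnot⟩ := ih hpw' K hK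
      refine ⟨d, ?_, ?_, ?_⟩
      · simp only [List.foldl_cons, hstep, heq]
      · intro j hj
        exact List.mem_cons_of_mem _ (hmem j hj)
      · intro hmem'
        rcases List.mem_cons.mp hmem' with h | h
        · -- t = u + 1 + d; show contradiction
          cases Nat.eq_zero_or_pos d with
          | inl h0 => subst h0; simp at h; exact hc h.symm
          | inr hpos =>
            have h0mem : PySem.List.pyGetD K (-1) 0 + 1 ∈ l := by
              have := hmem 0 hpos; simpa using this
            have := hhead _ h0mem
            omega
        · exact hnot h

-- A's full scan over a sorted list is the membership run from the minimum
theorem pvScanRun (l : List Int) (hpw : l.Pairwise (· ≤ ·)) (m : Int) (rest : List Int)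
    (hl : l = m :: rest) :
    ∃ d : Nat, 0 < d ∧
      l.foldl pvScanStep [] = (List.range d).map (fun (j : Nat) => m + (j : Int)) ∧
      (∀ j : Nat, j < d → m + (j : Int) ∈ l) ∧
      m + (d : Int) ∉ l := by
  subst hl
  obtain ⟨hhead, hpw'⟩ := List.pairwise_cons.mp hpw
  have hstep : pvScanStep [] m = [m] := by simp [pvScanStep]
  have hu : PySem.List.pyGetD [m] (-1) 0 = m := rfl
  obtain ⟨d, heq, hmem, hnot⟩ := pvScanExt rest hpw' [m] (by simp)
  rw [hu] at heq hmem hnot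
  refine ⟨d + 1, by omega, ?_, ?_, ?_⟩
  · simp only [List.foldl_cons, hstep, heq]
    rw [List.range_succ_eq_map, List.map_cons, List.map_map]
    simp only [List.singleton_append]
    congr 1
    · simp
    · refine List.map_congr_left ?_
      intro j _
      simp only [Function.comp_apply]
      push_cast; omega
  · intro j hj
    cases j with
    | zero => simp
    | succ j' =>
      refine List.mem_cons_of_mem _ ?_
      have := hmem j' (by omega)
      convert this using 1
      push_cast; omega
  · intro hmem'
    rcases List.mem_cons.mp hmem' with h | h
    · omega
    · refine hnot ?_
      convert h using 1
      push_cast; omega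

-- per-cell agreement: A's scan of the sorted group equals B's min-membership walk over the group's set
theorem pvCellMain (ts : List String) (T : List Int) :
    ((PySem.List.sorted T (fun t => t)).foldl pvScanStep []).map (pvLook ts) =
      (match PySem.List.min? (PySem.Set.ofList T) (fun t => t) with
        | none => []
        | some m => pvWalk ts (PySem.Set.ofList T) (PySem.Set.ofList T).length m) := by
  by_cases hT : T = []
  · subst hT; rfl
  · set L := PySem.List.sorted T (fun t => t) with hLdef
    set S : List Int := PySem.Set.ofList T with hSdef
    have hmemS : ∀ x : Int, x ∈ S ↔ x ∈ T := fun x => PySem.Set.mem_ofList T x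
    have hmemL : ∀ x : Int, x ∈ L ↔ x ∈ T := fun x => PySem.List.mem_sorted _ _ _ _
    have hLne : L ≠ [] := by
      intro h; exact hT ((PySem.List.sorted_eq_nil_iff _ _ _).mp h)
    obtain ⟨m, rest, hl⟩ := List.exists_cons_of_ne_nil hLne
    have hpw : L.Pairwise (· ≤ ·) := by
      have := PySem.List.sorted_pairwise T (fun t => t)
      simpa [hLdef] using this
    have hmmin : ∀ y ∈ T, m ≤ y := by
      intro y hy
      have := PySem.List.key_head_sorted_le (xs := T) (key := fun t => t) (m := m) (t := rest) (by rw [← hLdef, hl])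
      exact this y hy
    have hmT : m ∈ T := (hmemL m).mp (by rw [hl]; exact List.mem_cons_self ..)
    -- B's min is m
    have hSne : S ≠ [] := by
      intro h
      have := (hmemS m).mpr hmT
      rw [h] at this; exact List.not_mem_nil this
    obtain ⟨m', hm'⟩ : ∃ m', PySem.List.min? S (fun t => t) = some m' := by
      cases h : PySem.List.min? S (fun t => t) with
      | none => exact absurd ((PySem.List.min?_eq_none_iff _ _).mp h) hSne
      | some v => exact ⟨v, rfl⟩
    have hm'S : m' ∈ S := PySem.List.min?_mem hm'
    have hm'min : ∀ y ∈ S, m' ≤ y := fun y hy => PySem.List.min?_isMin hm' y hy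
    have hmm' : m' = m := by
      have h1 : m ≤ m' := hmmin m' ((hmemS m').mp hm'S)
      have h2 : m' ≤ m := hm'min m ((hmemS m).mpr hmT)
      omega
    -- A's scan
    obtain ⟨dA, hdApos, hAeq, hAmem, hAnot⟩ := pvScanRun L hpw m rest hl
    -- B's walk
    obtain ⟨dB, hdBle, hBeq, hBmem, hBlast⟩ := pvWalkSpec ts S S.length m
    have hBnot : m + (dB : Int) ∉ S := by
      rcases hBlast with h | h
      · rw [h]; exact pvPigeon S m (fun j hj => hBmem j (by omega))
      · exact h
    have hd : dA = dB := by
      refine pvRunUniq (fun x => x ∈ T) m dA dB ?_ ?_ ?_ ?_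
      · intro j hj; exact (hmemL _).mp (hAmem j hj)
      · intro h; exact hAnot ((hmemL _).mpr h)
      · intro j hj; exact (hmemS _).mp (hBmem j hj)
      · intro h; exact hBnot ((hmemS _).mpr h)
    rw [hm', hmm']
    show (L.foldl pvScanStep []).map (pvLook ts) = pvWalk ts S S.length m
    rw [hBeq, ← hd, hAeq, List.map_map]
    rfl

theorem target_words_for_each_source_word_spec : Claim_equal_target_words_for_each_source_word := by
  intro ss ts alignment _hDom hPre
  unfold Spec_target_words_for_each_source_word
  have hB := pv_parse_bounds ss ts alignment hPre
  have hA : target_words_for_each_source_word ss ts alignment =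
      ((PySem.List.sorted (alignment.map pvParsePair) (fun p => p.1)).foldl (pvStepA ts)
        (List.replicate ss.length [], List.replicate ss.length [])).2.map
        (fun ws => PySem.Str.join " " ws) := rfl
  have hBdef : target_words_for_each_source_word_alt ss ts alignment =
      ((alignment.map pvParsePair).foldl pvStepS (List.replicate ss.length PySem.Set.empty)).map
        (fun g => PySem.Str.join " " (match PySem.List.min? g (fun t => t) with
          | none => []
          | some m => pvWalk ts g g.length m)) := by
    rw [target_words_for_each_source_word_alt, List.foldl_map]
    rfl
  rw [hA, hBdef]
  obtain ⟨lenA1, lenA2⟩ := pvStepA_len ts (PySem.List.sorted (alignment.map pvParsePair) (fun p => p.1))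
    (List.replicate ss.length [], List.replicate ss.length [])
  have lenB := pvStepS_len (alignment.map pvParsePair) (List.replicate ss.length (PySem.Set.empty : PySem.Set Int))
  apply List.ext_getElem
  · rw [List.length_map, List.length_map, lenA2, lenB]
    simp
  intro k hk1 hk2
  have hkn : k < ss.length := by
    simp only [List.length_map, lenA2, List.length_replicate] at hk1
    exact hk1
  have hsb : ∀ p ∈ PySem.List.sorted (alignment.map pvParsePair) (fun p => p.1),
      -(ss.length : Int) ≤ p.2 ∧ p.2 < ss.length := by
    intro p hp
    exact hB p ((PySem.List.mem_sorted _ _ _ _).mp hp)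
  have hcellA := pvCellA ts ss.length (PySem.List.sorted (alignment.map pvParsePair) (fun p => p.1))
    (List.replicate ss.length [], List.replicate ss.length []) (by simp) (by simp) hsb k
  have hcellS := pvCellS ss.length (alignment.map pvParsePair) (List.replicate ss.length PySem.Set.empty)
    (by simp) hB k
  rw [pvRepGetD, pvRepGetD] at hcellA
  have hrepS : (List.replicate ss.length (PySem.Set.empty : PySem.Set Int)).getD k [] = [] := by
    rcases lt_or_ge k ss.length with h | h <;> simp [List.getD, h, PySem.Set.empty]
  rw [hrepS] at hcellS
  have hofl : (pvTisk ss.length (alignment.map pvParsePair) k).foldl PySem.Set.add ([] : PySem.Set Int)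
      = PySem.Set.ofList (pvTisk ss.length (alignment.map pvParsePair) k) :=
    (PySem.Set.ofList_eq_foldl _).symm
  rw [hofl] at hcellS
  have hpair := pvCellPair ts (pvTisk ss.length (PySem.List.sorted (alignment.map pvParsePair) (fun p => p.1)) k) []
  simp only [List.map_nil] at hpair
  rw [hpair] at hcellA
  have hA2 := congrArg Prod.snd hcellA
  simp only at hA2
  simp only [List.getElem_map]
  rw [← List.getD_eq_getElem _ ([] : List String) (by simpa using hk1),
      ← List.getD_eq_getElem _ ([] : PySem.Set Int) (by simpa using hk2)]
  rw [hA2, hcellS, pvTisk_sorted]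
  rw [pvCellMain ts (pvTisk ss.length (alignment.map pvParsePair) k)]
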